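-- pv_equiv track=rewrite | github.com/jatinarora2702/Competitive-Coding | codeforces/2020D.py | solve
-- ===== SOURCE A (Python) =====
-- mod = int(1e9 + 7)
--
-- def expo(x: int, p: int, dp: dict[int, int]) -> int:
--     if x in dp:
--         return dp[x]
--     x_curr = x
--     ans = 1
--     while p > 0:
--         if p % 2 == 1:
--             ans = (ans * x_curr) % mod
--         x_curr = (x_curr * x_curr) % mod
--         p //= 2
--     dp[x] = ans
--     return dp[x]
--
-- def solve(a: int, b: int, k: int, dp: dict[int, int]) -> tuple[int, int]:
--     n = (k * (a-1) + 1) % mod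
--     m = (k * (b-1)) % mod
--     for i in range(a):
--         m = (m * (n - i + mod)) % mod
--         m = (m * expo(i+1, mod-2, dp)) % mod
--     m = (m + 1) % mod
--     return n, m
-- ===== SOURCE B (Python) =====
-- # B: one pass accumulating falling product / present dp values / missing bases,
-- # then a single modular exponentiation instead of one per loop iteration.
-- # Return-value equivalence only: A additionally mutates dp in place; B does not.
-- mod = int(1e9 + 7)
--
-- def solve(a, b, k, dp):
--     n = (k * (a - 1) + 1) % mod
--     fall = 1
--     present = 1
--     missing = 1
--     for i in range(a):
--         fall = fall * ((n - i + mod) % mod) % mod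
--         x = i + 1
--         if x in dp:
--             present = present * dp[x] % mod
--         else:
--             missing = missing * x % mod
--     inv = pow(missing, mod - 2, mod)
--     m = ((k * (b - 1)) % mod * fall % mod * present % mod * inv + 1) % mod
--     return n, m
-- ===== Notes on version B (the rewrite author's own statement) =====
-- stated objective: faster
-- what changed: B replaces A's per-iteration 30-step modular exponentiation (expo(i+1, mod-2) for every i) by one pass that accumulates the falling product, the product of dp-present values and the product of missing bases, followed by a SINGLE modular exponentiation of the missing-base product, using (x*y)^e = x^e*y^e mod m.
import Mathlib
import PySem

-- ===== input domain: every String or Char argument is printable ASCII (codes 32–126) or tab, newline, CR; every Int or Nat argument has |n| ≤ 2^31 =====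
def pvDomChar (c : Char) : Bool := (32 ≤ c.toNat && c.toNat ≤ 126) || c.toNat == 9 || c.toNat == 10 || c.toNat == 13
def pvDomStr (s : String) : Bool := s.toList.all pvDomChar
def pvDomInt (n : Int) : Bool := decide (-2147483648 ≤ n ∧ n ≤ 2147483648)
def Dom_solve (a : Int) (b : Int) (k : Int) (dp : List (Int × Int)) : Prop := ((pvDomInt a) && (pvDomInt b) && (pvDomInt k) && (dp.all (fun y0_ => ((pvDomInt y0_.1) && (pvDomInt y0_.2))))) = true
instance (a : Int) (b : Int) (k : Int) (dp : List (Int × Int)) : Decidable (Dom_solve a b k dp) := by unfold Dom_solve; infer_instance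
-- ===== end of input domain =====

-- B accumulates the falling product, the dp-present values and the missing bases in one
-- pass and does a SINGLE modular exponentiation of the missing-base product, instead of
-- A's square-and-multiply call per loop iteration. Return-value equivalence only:
-- the Python A also mutates its memo dict dp in place, B does not.

-- ===== PORT A =====
def pvM : Int := 1000000007

def expoLoop (ans xcurr p : Int) : Int :=
  if _h : 0 < p then
    expoLoop (if PySem.Int.mod p 2 = 1 then PySem.Int.mod (ans * xcurr) pvM else ans)
             (PySem.Int.mod (xcurr * xcurr) pvM) (PySem.Int.floordiv p 2)
  else ans
termination_by p.toNat
decreasing_by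
  rw [PySem.Int.floordiv_eq_ediv_of_pos (by norm_num : (0:Int) < 2)]
  omega

def expo (x p : Int) (dp : PySem.Dict Int Int) : Int × PySem.Dict Int Int :=
  match dp.get? x with
  | some v => (v, dp)
  | none =>
      let ans := expoLoop 1 x p
      let dp' := dp.insert x ans
      ((dp'.get? x).getD 0, dp')

-- A's loop body (the two updates of m plus the memo-dict threading)
def stepA (n : Int) (st : Int × PySem.Dict Int Int) (i : Int) : Int × PySem.Dict Int Int :=
  let m := PySem.Int.mod (st.1 * (n - i + pvM)) pvM
  let e := expo (i + 1) (pvM - 2) st.2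
  (PySem.Int.mod (m * e.1) pvM, e.2)

def solve (a : Int) (b : Int) (k : Int) (dp : List (Int × Int)) : Int × Int :=
  let n := PySem.Int.mod (k * (a - 1) + 1) pvM
  let m0 := PySem.Int.mod (k * (b - 1)) pvM
  let st := (PySem.List.pyRange 0 a 1).foldl (stepA n) (m0, PySem.Dict.ofList dp)
  (n, PySem.Int.mod (st.1 + 1) pvM)

-- ===== PORT B =====
-- port of Source B's built-in three-argument pow(x, e, mod)
def powmod (x e : Int) : Int :=
  if _h : 0 < e then
    let r := powmod (PySem.Int.mod (x * x) pvM) (PySem.Int.floordiv e 2)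
    if PySem.Int.mod e 2 = 1 then PySem.Int.mod (r * x) pvM else r
  else 1
termination_by e.toNat
decreasing_by
  rw [PySem.Int.floordiv_eq_ediv_of_pos (by norm_num : (0:Int) < 2)]
  omega

-- B's loop body: falling product, product of dp-present values, product of missing bases
def stepB (d : PySem.Dict Int Int) (n : Int) (s : Int × Int × Int) (i : Int) : Int × Int × Int :=
  let fall := PySem.Int.mod (s.1 * PySem.Int.mod (n - i + pvM) pvM) pvM
  match d.get? (i + 1) with
  | some v => (fall, PySem.Int.mod (s.2.1 * v) pvM, s.2.2)
  | none => (fall, s.2.1, PySem.Int.mod (s.2.2 * (i + 1)) pvM)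

def solve_alt (a : Int) (b : Int) (k : Int) (dp : List (Int × Int)) : Int × Int :=
  let d := PySem.Dict.ofList dp
  let n := PySem.Int.mod (k * (a - 1) + 1) pvM
  let s := (PySem.List.pyRange 0 a 1).foldl (stepB d n) (1, 1, 1)
  let inv := powmod s.2.2 (pvM - 2)
  let m := PySem.Int.mod
    (PySem.Int.mod (PySem.Int.mod (PySem.Int.mod (k * (b - 1)) pvM * s.1) pvM * s.2.1) pvM * inv + 1) pvM
  (n, m)

-- ===== PRECONDITION & SPEC =====
def Spec_solve (a : Int) (b : Int) (k : Int) (dp : List (Int × Int)) (out : Int × Int) : Prop := out = solve_alt a b k dp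
instance (a : Int) (b : Int) (k : Int) (dp : List (Int × Int)) (out : Int × Int) : Decidable (Spec_solve a b k dp out) := by unfold Spec_solve; infer_instance

-- ===== CLAIM (what is proved, stated in full; the proofs are below) =====
def Claim_equal_solve : Prop := ∀ (a : Int) (b : Int) (k : Int) (dp : List (Int × Int)), Dom_solve a b k dp → Spec_solve a b k dp (solve a b k dp)

-- ===== LEMMAS AND PROOFS =====

-- the exponent mod-2, as a Nat
def pvE : Nat := (pvM - 2).toNat

-- reference factor of loop index j: the dp value if present, else (j+1)^(mod-2)
def pvF (d : PySem.Dict Int Int) (j : Int) : Int :=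
  match d.get? (j + 1) with
  | some v => v
  | none => (j + 1) ^ pvE

lemma pymod_eq (y : Int) : PySem.Int.mod y pvM = y % pvM :=
  PySem.Int.mod_eq_emod_of_pos (by norm_num [pvM])

lemma selfmod (a : Int) : a % pvM ≡ a [ZMOD pvM] := Int.emod_emod_of_dvd _ dvd_rfl

lemma mod_nonneg' (a : Int) : 0 ≤ a % pvM := Int.emod_nonneg a (by norm_num [pvM])

lemma mod_lt' (a : Int) : a % pvM < pvM := Int.emod_lt_of_pos a (by norm_num [pvM])

lemma expoLoop_spec : ∀ (pn : Nat) (p ans x : Int), p.toNat = pn → 0 < p →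
    expoLoop ans x p = (ans * x ^ pn) % pvM := by
  intro pn
  induction pn using Nat.strong_induction_on with
  | _ pn ih =>
    intro p ans x hpn hp
    rw [expoLoop, dif_pos hp,
        PySem.Int.floordiv_eq_ediv_of_pos (by norm_num : (0:Int) < 2),
        PySem.Int.mod_eq_emod_of_pos (by norm_num : (0:Int) < 2)]
    simp only [pymod_eq]
    by_cases h1 : p = 1
    · subst h1
      have hpn1 : pn = 1 := by omega
      subst hpn1
      norm_num
      rw [expoLoop]
      norm_num
    · have hq : 0 < p / 2 := by omega
      have hlt : (p / 2).toNat < pn := by omega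
      rw [ih (p/2).toNat hlt (p/2) _ _ rfl hq]
      have hxx : ((x * x) % pvM) ≡ x * x [ZMOD pvM] := selfmod _
      have hpow : ((x * x) % pvM) ^ (p/2).toNat ≡ (x * x) ^ (p/2).toNat [ZMOD pvM] := hxx.pow _
      by_cases hr : p % 2 = 1
      · simp only [if_pos hr]
        have hpn2 : pn = 2 * (p/2).toNat + 1 := by omega
        have h1' : (ans * x) % pvM ≡ ans * x [ZMOD pvM] := selfmod _
        calc ((ans * x) % pvM) * ((x*x) % pvM) ^ (p/2).toNat % pvM
            = (ans * x) * (x*x) ^ (p/2).toNat % pvM := h1'.mul hpow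
          _ = (ans * x ^ pn) % pvM := by
              rw [hpn2, show (x*x) = x^2 by ring, ← pow_mul]; ring_nf
      · simp only [if_neg hr]
        have hpn2 : pn = 2 * (p/2).toNat := by omega
        calc ans * ((x*x) % pvM) ^ (p/2).toNat % pvM
            = ans * (x*x) ^ (p/2).toNat % pvM := (Int.ModEq.refl ans).mul hpow
          _ = (ans * x ^ pn) % pvM := by
              rw [hpn2, show (x*x) = x^2 by ring, ← pow_mul]

lemma powmod_spec : ∀ (en : Nat) (e x : Int), e.toNat = en → powmod x e = x ^ en % pvM := by
  intro en
  induction en using Nat.strong_induction_on with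
  | _ en ih =>
    intro e x hen
    rw [powmod]
    by_cases hp : 0 < e
    · rw [dif_pos hp,
          PySem.Int.floordiv_eq_ediv_of_pos (by norm_num : (0:Int) < 2),
          PySem.Int.mod_eq_emod_of_pos (by norm_num : (0:Int) < 2)]
      simp only [pymod_eq]
      have hlt : (e / 2).toNat < en := by omega
      rw [ih (e/2).toNat hlt (e/2) _ rfl]
      have hxx : ((x * x) % pvM) ≡ x * x [ZMOD pvM] := selfmod _
      have hpow : ((x * x) % pvM) ^ (e/2).toNat % pvM = (x * x) ^ (e/2).toNat % pvM := hxx.pow _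
      by_cases hr : e % 2 = 1
      · simp only [if_pos hr]
        have hen2 : en = 2 * (e/2).toNat + 1 := by omega
        have h1 : ((x*x) % pvM) ^ (e/2).toNat % pvM ≡ (x*x) ^ (e/2).toNat [ZMOD pvM] :=
          (selfmod _).trans (hxx.pow _)
        calc ((x*x) % pvM) ^ (e/2).toNat % pvM * x % pvM
            = ((x*x) ^ (e/2).toNat * x) % pvM := h1.mul_right x
          _ = x ^ en % pvM := by
              rw [hen2, show (x*x) = x^2 by ring, ← pow_mul]; ring_nf
      · simp only [if_neg hr]
        have hen2 : en = 2 * (e/2).toNat := by omega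
        rw [hpow, hen2, show (x*x) = x^2 by ring, ← pow_mul]
    · rw [dif_neg hp]
      have h0 : en = 0 := by omega
      rw [h0, pow_zero]
      norm_num [pvM]

-- one congruence step shared by both cases of the A-loop invariant
lemma stepA_cong (m g fv ev Pt : Int) (hev : ev ≡ fv [ZMOD pvM]) :
    ((m * g) % pvM * ev) % pvM * Pt % pvM = (m * (g * fv * Pt)) % pvM := by
  have h2 : ((m * g) % pvM * ev) % pvM ≡ (m * g) * fv [ZMOD pvM] :=
    (selfmod _).trans ((selfmod _).mul hev)
  calc ((m * g) % pvM * ev) % pvM * Pt % pvM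
      = ((m * g) * fv) * Pt % pvM := h2.mul_right Pt
    _ = (m * (g * fv * Pt)) % pvM := by ring_nf

-- A's loop, measured against the reference factors of the ORIGINAL dict d0
lemma foldA_spec (n : Int) (d0 : PySem.Dict Int Int) :
    ∀ (l : List Int) (d : PySem.Dict Int Int) (m : Int),
      (∀ j ∈ l, d.get? (j + 1) = d0.get? (j + 1)) → l.Nodup → 0 ≤ m → m < pvM →
      (l.foldl (stepA n) (m, d)).1
        = (m * (l.map (fun j => (n - j + pvM) * pvF d0 j)).prod) % pvM := by
  intro l
  induction l with
  | nil =>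
      intro d m _ _ h0 h1
      simp [Int.emod_eq_of_lt h0 h1]
  | cons i t ih =>
      intro d m hag hnd h0 h1
      have hdi : d.get? (i + 1) = d0.get? (i + 1) := hag i (by simp)
      have hnd' := List.nodup_cons.mp hnd
      simp only [List.foldl_cons, List.map_cons, List.prod_cons]
      cases hget : d.get? (i + 1) with
      | some v =>
          have hstep : stepA n (m, d) i
              = (PySem.Int.mod (PySem.Int.mod (m * (n - i + pvM)) pvM * v) pvM, d) := by
            simp [stepA, expo, hget]
          rw [hstep,
              ih d _ (fun j hj => hag j (by simp [hj])) hnd'.2 (by simp [pymod_eq, mod_nonneg'])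
                (by simp [pymod_eq, mod_lt'])]
          simp only [pymod_eq]
          have hF : pvF d0 i = v := by simp [pvF, ← hdi, hget]
          rw [hF]
          exact stepA_cong m (n - i + pvM) v v _ (Int.ModEq.refl v)
      | none =>
          have hd0 : d0.get? (i + 1) = none := by rw [← hdi]; exact hget
          have hans : expoLoop 1 (i + 1) (pvM - 2) = (1 * (i + 1) ^ pvE) % pvM :=
            expoLoop_spec pvE (pvM - 2) 1 (i + 1) rfl (by norm_num [pvM])
          have hstep : stepA n (m, d) i
              = (PySem.Int.mod (PySem.Int.mod (m * (n - i + pvM)) pvM * expoLoop 1 (i+1) (pvM-2)) pvM,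
                 d.insert (i + 1) (expoLoop 1 (i+1) (pvM-2))) := by
            simp [stepA, expo, hget, PySem.Dict.get?_insert_self]
          rw [hstep]
          have hagt : ∀ j ∈ t, (d.insert (i + 1) (expoLoop 1 (i+1) (pvM-2))).get? (j + 1) = d0.get? (j + 1) := by
            intro j hj
            have hji : j ≠ i := fun h => hnd'.1 (h ▸ hj)
            rw [PySem.Dict.get?_insert_of_ne _ _ (by omega : j + 1 ≠ i + 1)]
            exact hag j (by simp [hj])
          rw [ih _ _ hagt hnd'.2 (by simp [pymod_eq, mod_nonneg']) (by simp [pymod_eq, mod_lt'])]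
          simp only [pymod_eq]
          have hF : pvF d0 i = (i + 1) ^ pvE := by simp [pvF, hd0]
          rw [hF, hans]
          exact stepA_cong m (n - i + pvM) ((i+1)^pvE) _ _ (by simpa using selfmod (1 * (i+1)^pvE))

-- B's loop: falling product and combined present·missing^E, against the same factors
lemma foldB_spec (n : Int) (d0 : PySem.Dict Int Int) :
    ∀ (l : List Int) (f p mi : Int),
      ((l.foldl (stepB d0 n) (f, p, mi)).1
          ≡ f * (l.map (fun j => n - j + pvM)).prod [ZMOD pvM]) ∧
      ((l.foldl (stepB d0 n) (f, p, mi)).2.1 * (l.foldl (stepB d0 n) (f, p, mi)).2.2 ^ pvE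
          ≡ p * mi ^ pvE * (l.map (pvF d0)).prod [ZMOD pvM]) := by
  intro l
  induction l with
  | nil => intro f p mi; constructor <;> simp
  | cons i t ih =>
      intro f p mi
      simp only [List.foldl_cons, List.map_cons, List.prod_cons]
      cases hget : d0.get? (i + 1) with
      | some v =>
          have hstep : stepB d0 n (f, p, mi) i
              = (PySem.Int.mod (f * PySem.Int.mod (n - i + pvM) pvM) pvM,
                 PySem.Int.mod (p * v) pvM, mi) := by
            simp [stepB, hget]
          rw [hstep]
          obtain ⟨ih1, ih2⟩ := ih (PySem.Int.mod (f * PySem.Int.mod (n - i + pvM) pvM) pvM)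
            (PySem.Int.mod (p * v) pvM) mi
          have hF : pvF d0 i = v := by simp [pvF, hget]
          constructor
          · refine ih1.trans ?_
            simp only [pymod_eq]
            calc (f * ((n - i + pvM) % pvM)) % pvM * (t.map (fun j => n - j + pvM)).prod
                ≡ f * (n - i + pvM) * (t.map (fun j => n - j + pvM)).prod [ZMOD pvM] :=
                  (((selfmod _).trans ((Int.ModEq.refl f).mul (selfmod _)))).mul_right _
              _ = f * ((n - i + pvM) * (t.map (fun j => n - j + pvM)).prod) := by ring
          · refine ih2.trans ?_
            simp only [pymod_eq, hF]
            calc (p * v) % pvM * mi ^ pvE * (t.map (pvF d0)).prod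
                ≡ p * v * mi ^ pvE * (t.map (pvF d0)).prod [ZMOD pvM] :=
                  ((selfmod _).mul_right _).mul_right _
              _ = p * mi ^ pvE * (v * (t.map (pvF d0)).prod) := by ring
      | none =>
          have hstep : stepB d0 n (f, p, mi) i
              = (PySem.Int.mod (f * PySem.Int.mod (n - i + pvM) pvM) pvM,
                 p, PySem.Int.mod (mi * (i + 1)) pvM) := by
            simp [stepB, hget]
          rw [hstep]
          obtain ⟨ih1, ih2⟩ := ih (PySem.Int.mod (f * PySem.Int.mod (n - i + pvM) pvM) pvM)
            p (PySem.Int.mod (mi * (i + 1)) pvM)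
          have hF : pvF d0 i = (i + 1) ^ pvE := by simp [pvF, hget]
          constructor
          · refine ih1.trans ?_
            simp only [pymod_eq]
            calc (f * ((n - i + pvM) % pvM)) % pvM * (t.map (fun j => n - j + pvM)).prod
                ≡ f * (n - i + pvM) * (t.map (fun j => n - j + pvM)).prod [ZMOD pvM] :=
                  (((selfmod _).trans ((Int.ModEq.refl f).mul (selfmod _)))).mul_right _
              _ = f * ((n - i + pvM) * (t.map (fun j => n - j + pvM)).prod) := by ring
          · refine ih2.trans ?_
            simp only [pymod_eq, hF]
            calc p * ((mi * (i + 1)) % pvM) ^ pvE * (t.map (pvF d0)).prod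
                ≡ p * (mi * (i + 1)) ^ pvE * (t.map (pvF d0)).prod [ZMOD pvM] :=
                  (((Int.ModEq.refl p).mul ((selfmod _).pow _))).mul_right _
              _ = p * mi ^ pvE * ((i + 1) ^ pvE * (t.map (pvF d0)).prod) := by
                  rw [mul_pow]; ring

-- ===== VERDICT (by name: the statement is the Claim_ definition above) =====
theorem solve_spec : Claim_equal_solve := by
  intro a b k dp _
  unfold Spec_solve solve solve_alt
  simp only []
  set d0 := PySem.Dict.ofList dp with hd0
  set n := PySem.Int.mod (k * (a - 1) + 1) pvM with hn
  set l := PySem.List.pyRange 0 a 1 with hl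
  refine Prod.ext rfl ?_
  simp only [pymod_eq]
  rw [foldA_spec n d0 l d0 _ (fun j _ => rfl) (PySem.List.nodup_pyRange_one 0 a) (mod_nonneg' _) (mod_lt' _)]
  obtain ⟨h1, h2⟩ := foldB_spec n d0 l 1 1 1
  rw [powmod_spec pvE (pvM - 2) _ rfl]
  set m0 := (k * (b - 1)) % pvM with hm0
  set s := l.foldl (stepB d0 n) (1, 1, 1) with hs
  have hprod : (l.map (fun j => (n - j + pvM) * pvF d0 j)).prod
      = (l.map (fun j => n - j + pvM)).prod * (l.map (pvF d0)).prod := by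
    rw [← List.prod_map_mul]
  have key : (m0 * (l.map (fun j => (n - j + pvM) * pvF d0 j)).prod) % pvM
      ≡ ((m0 * s.1) % pvM * s.2.1) % pvM * (s.2.2 ^ pvE % pvM) [ZMOD pvM] := by
    have hr : ((m0 * s.1) % pvM * s.2.1) % pvM * (s.2.2 ^ pvE % pvM)
        ≡ m0 * s.1 * (s.2.1 * s.2.2 ^ pvE) [ZMOD pvM] := by
      calc ((m0 * s.1) % pvM * s.2.1) % pvM * (s.2.2 ^ pvE % pvM)
          ≡ (m0 * s.1) * s.2.1 * s.2.2 ^ pvE [ZMOD pvM] :=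
            Int.ModEq.mul ((selfmod _).trans ((selfmod _).mul_right _)) (selfmod _)
        _ = m0 * s.1 * (s.2.1 * s.2.2 ^ pvE) := by ring
    have hbig : m0 * s.1 * (s.2.1 * s.2.2 ^ pvE)
        ≡ m0 * (l.map (fun j => (n - j + pvM) * pvF d0 j)).prod [ZMOD pvM] := by
      calc m0 * s.1 * (s.2.1 * s.2.2 ^ pvE)
          ≡ m0 * (1 * (l.map (fun j => n - j + pvM)).prod)
              * (1 * 1 ^ pvE * (l.map (pvF d0)).prod) [ZMOD pvM] :=
            ((Int.ModEq.refl m0).mul h1).mul h2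
        _ = m0 * ((l.map (fun j => n - j + pvM)).prod * (l.map (pvF d0)).prod) := by ring
        _ = m0 * (l.map (fun j => (n - j + pvM) * pvF d0 j)).prod := by rw [hprod]
    exact (selfmod _).trans (hr.trans hbig).symm
  exact (key.add_right 1 : _)
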